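-- pv_equiv track=rewrite | github.com/tlgs/aoc-2023 | 02.py | part_two
-- ===== SOURCE A (Python) =====
-- def part_two(games):
--     total = 0
--     for game in games:
--         mr = mg = mb = 0
--         for r, g, b in game:
--             mr, mg, mb = max(mr, r), max(mg, g), max(mb, b)
--
--         total += mr * mg * mb
--
--     return total
-- ===== SOURCE B (Python) =====
-- def part_two(games):
--     # Divide-and-conquer: channel maxima per game by recursive halving with a
--     # triple merge; grand total by recursive halving with addition.
--     def merge(x, y):
--         return (max(x[0], y[0]), max(x[1], y[1]), max(x[2], y[2]))
--
--     def game_max(game):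
--         if not game:
--             return (0, 0, 0)
--         if len(game) == 1:
--             r, g, b = game[0]
--             return (max(0, r), max(0, g), max(0, b))
--         k = len(game) // 2
--         return merge(game_max(game[:k]), game_max(game[k:]))
--
--     def total(gs):
--         if not gs:
--             return 0
--         if len(gs) == 1:
--             mr, mg, mb = game_max(gs[0])
--             return mr * mg * mb
--         k = len(gs) // 2
--         return total(gs[:k]) + total(gs[k:])
--
--     return total(games)
-- ===== Notes on version B (the rewrite author's own statement) =====
-- stated objective: alternative
-- what changed: Replaces A's fused iterative accumulation (one loop carrying total, inner loop carrying an (mr,mg,mb) triple) with divide-and-conquer recursion: each game's channel maxima are computed by recursively splitting the game in half and merging triples, and the total by recursively splitting the games list and adding the halves.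
import Mathlib
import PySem

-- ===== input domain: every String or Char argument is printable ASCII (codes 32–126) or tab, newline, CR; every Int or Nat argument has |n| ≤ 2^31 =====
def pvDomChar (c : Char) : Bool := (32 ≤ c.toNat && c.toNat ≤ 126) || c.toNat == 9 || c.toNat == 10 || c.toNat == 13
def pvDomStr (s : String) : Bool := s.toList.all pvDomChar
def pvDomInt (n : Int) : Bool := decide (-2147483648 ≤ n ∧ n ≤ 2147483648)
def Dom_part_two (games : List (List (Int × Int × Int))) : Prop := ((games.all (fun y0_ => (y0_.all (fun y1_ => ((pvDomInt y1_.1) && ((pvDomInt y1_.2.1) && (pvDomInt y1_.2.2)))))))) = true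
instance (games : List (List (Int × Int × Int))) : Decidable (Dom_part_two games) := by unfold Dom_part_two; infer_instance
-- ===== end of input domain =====

-- B replaces A's fused iterative accumulation with divide-and-conquer recursion
-- (recursive halving for each game's channel maxima and for the grand total); alternative decomposition, same cost.


-- ===== PORT A =====
-- literal port: outer loop accumulates total; inner loop carries the triple (mr, mg, mb)
def part_two (games : List (List (Int × Int × Int))) : Int :=
  games.foldl
    (fun total game =>
      let m := game.foldl
        (fun (s : Int × Int × Int) t => (max s.1 t.1, max s.2.1 t.2.1, max s.2.2 t.2.2))
        (0, 0, 0)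
      total + m.1 * m.2.1 * m.2.2)
    0

-- ===== PORT B =====
-- Source B's merge: componentwise max of two triples
def pvMerge (x y : Int × Int × Int) : Int × Int × Int :=
  (max x.1 y.1, max x.2.1 y.2.1, max x.2.2 y.2.2)

-- Source B's game_max: channel maxima of one game by divide and conquer
def pvGameMax (game : List (Int × Int × Int)) : Int × Int × Int :=
  match game with
  | [] => (0, 0, 0)
  | [t] => (max 0 t.1, max 0 t.2.1, max 0 t.2.2)
  | a :: b :: rest =>
    let l := a :: b :: rest
    let k := l.length / 2
    pvMerge (pvGameMax (l.take k)) (pvGameMax (l.drop k))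
termination_by game.length
decreasing_by
  all_goals simp [List.length_take, List.length_drop]; omega

-- Source B's total: sum of per-game products by divide and conquer
def pvTotal (gs : List (List (Int × Int × Int))) : Int :=
  match gs with
  | [] => 0
  | [g] =>
    let m := pvGameMax g
    m.1 * m.2.1 * m.2.2
  | a :: b :: rest =>
    let l := a :: b :: rest
    let k := l.length / 2
    pvTotal (l.take k) + pvTotal (l.drop k)
termination_by gs.length
decreasing_by
  all_goals simp [List.length_take, List.length_drop]; omega

def part_two_alt (games : List (List (Int × Int × Int))) : Int :=
  pvTotal games

-- ===== PRECONDITION & SPEC =====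
def Spec_part_two (games : List (List (Int × Int × Int))) (out : Int) : Prop := out = part_two_alt games
instance (games : List (List (Int × Int × Int))) (out : Int) : Decidable (Spec_part_two games out) := by unfold Spec_part_two; infer_instance

-- ===== CLAIM (what is proved, stated in full; the proofs are below) =====
def Claim_equal_part_two : Prop := ∀ (games : List (List (Int × Int × Int))), Dom_part_two games → Spec_part_two games (part_two games)

-- ===== LEMMAS AND PROOFS =====

-- F xs = left max-fold from 0 (the value A's inner loop computes per channel)
def pvF (xs : List Int) : Int := xs.foldl max 0

theorem le_foldl_max (a : Int) (xs : List Int) : a ≤ xs.foldl max a := by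
  induction xs generalizing a with
  | nil => simp
  | cons x xs ih => exact le_trans (le_max_left a x) (ih (max a x))

theorem foldl_max_shift (a : Int) (xs : List Int) (ha : 0 ≤ a) :
    xs.foldl max a = max a (pvF xs) := by
  induction xs generalizing a with
  | nil => simp [pvF]; omega
  | cons x xs ih =>
    have h1 := ih (max a x) (le_trans ha (le_max_left a x))
    have h2 := ih (max 0 x) (le_max_left 0 x)
    simp only [List.foldl_cons, pvF] at *
    rw [h1, h2]; omega

theorem pvF_append (xs ys : List Int) : pvF (xs ++ ys) = max (pvF xs) (pvF ys) := by
  have h0 : (0 : Int) ≤ pvF xs := le_foldl_max 0 xs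
  simp only [pvF, List.foldl_append]
  exact foldl_max_shift (pvF xs) ys h0

-- gameMax computes the three channel max-folds
theorem pvGameMax_eq (game : List (Int × Int × Int)) :
    pvGameMax game
      = (pvF (game.map (fun t => t.1)),
         pvF (game.map (fun t => t.2.1)),
         pvF (game.map (fun t => t.2.2))) := by
  induction game using pvGameMax.induct with
  | case1 => simp [pvGameMax, pvF]
  | case2 t => simp [pvGameMax, pvF]
  | case3 a b rest l k ihT ihD =>
    simp only [l, k] at ihT ihD
    rw [pvGameMax]
    simp only [pvMerge, ihT, ihD]
    have h : ∀ f : (Int × Int × Int) → Int,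
        max (pvF (((a :: b :: rest).take ((a :: b :: rest).length / 2)).map f))
            (pvF (((a :: b :: rest).drop ((a :: b :: rest).length / 2)).map f))
          = pvF ((a :: b :: rest).map f) := by
      intro f
      rw [← pvF_append, ← List.map_append, List.take_append_drop]
    exact Prod.ext (h _) (Prod.ext (h _) (h _))

-- the per-game product A adds for one game
def pvProd (game : List (Int × Int × Int)) : Int :=
  (pvF (game.map (fun t => t.1))) * (pvF (game.map (fun t => t.2.1))) * (pvF (game.map (fun t => t.2.2)))

theorem pvTotal_eq (gs : List (List (Int × Int × Int))) :
    pvTotal gs = (gs.map pvProd).sum := by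
  induction gs using pvTotal.induct with
  | case1 => simp [pvTotal]
  | case2 g => simp [pvTotal, pvGameMax_eq, pvProd]
  | case3 a b rest l k ihT ihD =>
    simp only [l, k] at ihT ihD
    rw [pvTotal]
    simp only [ihT, ihD]
    rw [← List.sum_append, ← List.map_append, List.take_append_drop]

-- the fused triple fold equals the three componentwise folds
theorem triple_fold_eq (game : List (Int × Int × Int)) (a b c : Int) :
    game.foldl (fun (s : Int × Int × Int) t => (max s.1 t.1, max s.2.1 t.2.1, max s.2.2 t.2.2)) (a, b, c)
      = ((game.map (fun t => t.1)).foldl max a,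
         (game.map (fun t => t.2.1)).foldl max b,
         (game.map (fun t => t.2.2)).foldl max c) := by
  induction game generalizing a b c with
  | nil => rfl
  | cons h t ih => simp [List.foldl, ih]

theorem part_two_foldl_eq (games : List (List (Int × Int × Int))) (t : Int) :
    games.foldl
      (fun total game =>
        let m := game.foldl
          (fun (s : Int × Int × Int) t => (max s.1 t.1, max s.2.1 t.2.1, max s.2.2 t.2.2))
          (0, 0, 0)
        total + m.1 * m.2.1 * m.2.2) t
      = t + (games.map pvProd).sum := by
  induction games generalizing t with
  | nil => simp
  | cons g gs ih =>
    rw [List.foldl_cons, ih]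
    simp only [List.map, List.sum_cons, triple_fold_eq, pvProd, pvF]
    ring

-- ===== VERDICT (by name: the statement is the Claim_ definition above) =====
theorem part_two_spec : Claim_equal_part_two := by
  intro games _
  unfold Spec_part_two part_two part_two_alt
  rw [part_two_foldl_eq, pvTotal_eq]
  ring
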